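-- pv_equiv track=rewrite | github.com/0x6N/Project-Election | project/gamma.py | missed_order_count
-- ===== SOURCE A (Python) =====
-- def missed_order_count(ordering, S, memo):
--     if len(ordering) <= 1:
--         return 0
--     if ordering in memo:
--         return memo[ordering]
--     first = ordering[0]
--     val = sum(S[first][x] for x in ordering[1:]) + missed_order_count(ordering[1:], S, memo)
--     memo[ordering] = val
--     return val
-- ===== SOURCE B (Python) =====
-- def missed_order_count(ordering, S, memo):
--     if len(ordering) <= 1:
--         return 0
--     # peel suffixes until the first memoised one (or a length-1 suffix), then unwind
--     stack = []
--     suf = ordering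
--     while len(suf) > 1 and suf not in memo:
--         stack.append(suf)
--         suf = suf[1:]
--     run = memo[suf] if len(suf) > 1 else 0
--     while stack:
--         suf = stack.pop()
--         run = run + sum(S[suf[0]][y] for y in suf[1:])
--         memo[suf] = run
--     return run
-- ===== Notes on version B (the rewrite author's own statement) =====
-- stated objective: alternative
-- what changed: Replaces A's linear suffix recursion by an explicit two-phase iteration: a peel loop that pushes suffixes on a stack until the first memoised suffix (or a length-1 suffix), then an unwind loop that pops the stack accumulating the row sums.
import Mathlib
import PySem

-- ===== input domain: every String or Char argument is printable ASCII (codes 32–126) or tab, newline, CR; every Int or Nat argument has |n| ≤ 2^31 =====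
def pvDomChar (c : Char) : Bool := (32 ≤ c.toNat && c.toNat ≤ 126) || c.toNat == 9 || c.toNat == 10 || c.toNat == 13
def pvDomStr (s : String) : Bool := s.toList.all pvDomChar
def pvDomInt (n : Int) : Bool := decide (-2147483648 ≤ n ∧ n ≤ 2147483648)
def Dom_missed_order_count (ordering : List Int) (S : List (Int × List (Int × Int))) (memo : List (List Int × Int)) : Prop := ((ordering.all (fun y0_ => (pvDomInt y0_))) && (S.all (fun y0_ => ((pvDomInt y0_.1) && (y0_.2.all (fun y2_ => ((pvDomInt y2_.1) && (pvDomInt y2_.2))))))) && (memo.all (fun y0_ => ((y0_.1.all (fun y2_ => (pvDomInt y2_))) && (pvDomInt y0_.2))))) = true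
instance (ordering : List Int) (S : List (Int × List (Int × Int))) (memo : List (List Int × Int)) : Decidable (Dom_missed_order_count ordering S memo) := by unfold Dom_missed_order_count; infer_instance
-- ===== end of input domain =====

-- B replaces A's suffix recursion by an explicit stack: peel suffixes until the first memoised
-- (or length-1) suffix, then unwind accumulating the row sums. Equivalence is about the RETURN
-- value; both Pythons mutate `memo` (B performs the same insertions as A).

-- ===== PORT A =====
def missed_order_count (ordering : List Int) (S : List (Int × List (Int × Int))) (memo : List (List Int × Int)) : Int :=
  if ordering.length ≤ 1 then 0
  else
    match (PySem.Dict.mk memo).get? ordering with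
    | some v => v
    | none =>
      let first := PySem.List.pyGetD ordering 0 0
      let tail := PySem.List.slice ordering (some 1) none
      -- sum(S[first][x] for x in ordering[1:]); lookups via getD, exact under Pre_
      (tail.map (fun x =>
        ((PySem.Dict.mk (((PySem.Dict.mk S).get? first).getD [])).get? x).getD 0)).sum
        + missed_order_count tail S memo
termination_by ordering.length
decreasing_by
  simp [PySem.List.slice_from_one, List.length_tail]; omega

-- ===== PORT B =====
-- first while-loop of Source B: push suffixes until a memoised or length-1 suffix
def altPeel (memo : List (List Int × Int)) (suf : List Int) (stack : List (List Int)) :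
    List (List Int) × List Int :=
  if 1 < suf.length ∧ (PySem.Dict.mk memo).get? suf = none then
    altPeel memo (PySem.List.slice suf (some 1) none) (suf :: stack)
  else (stack, suf)
termination_by suf.length
decreasing_by
  simp [PySem.List.slice_from_one, List.length_tail]; omega

-- second while-loop of Source B: pop the stack, accumulating row sums
def altUnwind (S : List (Int × List (Int × Int))) : List (List Int) → Int → Int
  | [], run => run
  | suf :: stack, run =>
      altUnwind S stack (run + ((PySem.List.slice suf (some 1) none).map (fun y =>
        ((PySem.Dict.mk (((PySem.Dict.mk S).get? (PySem.List.pyGetD suf 0 0)).getD [])).get? y).getD 0)).sum)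

def missed_order_count_alt (ordering : List Int) (S : List (Int × List (Int × Int))) (memo : List (List Int × Int)) : Int :=
  if ordering.length ≤ 1 then 0
  else
    let ps := altPeel memo ordering []
    -- memo[suf] if len(suf) > 1 else 0; in that branch the peel loop guarantees the hit, so getD is exact
    let run := if 1 < ps.2.length then ((PySem.Dict.mk memo).get? ps.2).getD 0 else 0
    altUnwind S ps.1 run

-- ===== PRECONDITION & SPEC =====
-- Pre_ excludes exactly the inputs on which Python A raises KeyError: a sum over some suffix k
-- that A actually reaches (no memoised suffix starts at or before k) needs a missing entry
-- S[ordering[k]][ordering[j]]; B performs the same lookups and raises there too.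
def Pre_missed_order_count (ordering : List Int) (S : List (Int × List (Int × Int))) (memo : List (List Int × Int)) : Prop :=
  ∀ j < ordering.length, ∀ k < j,
    ((List.range (k + 1)).any (fun i => ((PySem.Dict.mk memo).get? (ordering.drop i)).isSome)) = true ∨
    ((PySem.Dict.mk (((PySem.Dict.mk S).get? (ordering.getD k 0)).getD [])).get? (ordering.getD j 0)).isSome = true
instance (ordering : List Int) (S : List (Int × List (Int × Int))) (memo : List (List Int × Int)) : Decidable (Pre_missed_order_count ordering S memo) := by unfold Pre_missed_order_count; infer_instance

def pvWitness_missed_order_count : List Int × (List (Int × List (Int × Int))) × (List (List Int × Int)) :=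
  ([1, 2], [(1, [(2, 5)])], [])

def Spec_missed_order_count (ordering : List Int) (S : List (Int × List (Int × Int))) (memo : List (List Int × Int)) (out : Int) : Prop := out = missed_order_count_alt ordering S memo
instance (ordering : List Int) (S : List (Int × List (Int × Int))) (memo : List (List Int × Int)) (out : Int) : Decidable (Spec_missed_order_count ordering S memo out) := by unfold Spec_missed_order_count; infer_instance

-- ===== CLAIM (what is proved, stated in full; the proofs are below) =====
def Claim_equal_missed_order_count : Prop := ∀ (ordering : List Int) (S : List (Int × List (Int × Int))) (memo : List (List Int × Int)), Dom_missed_order_count ordering S memo → Pre_missed_order_count ordering S memo → Spec_missed_order_count ordering S memo (missed_order_count ordering S memo)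

-- ===== LEMMAS AND PROOFS =====

-- Unwinding the peeled stack from the stopping suffix's value computes A's value of the start
-- suffix; the equation is generalised over the stack already pushed.
lemma peel_unwind (S : List (Int × List (Int × Int))) (memo : List (List Int × Int)) :
    ∀ (suf : List Int) (stack : List (List Int)),
      altUnwind S (altPeel memo suf stack).1
        (if 1 < (altPeel memo suf stack).2.length
          then ((PySem.Dict.mk memo).get? (altPeel memo suf stack).2).getD 0 else 0)
      = altUnwind S stack (missed_order_count suf S memo) := by
  intro suf
  induction suf with
  | nil =>
    intro stack
    rw [altPeel, missed_order_count]
    simp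
  | cons x rest ih =>
    intro stack
    rw [altPeel]
    by_cases hc : 1 < (x :: rest).length ∧ (PySem.Dict.mk memo).get? (x :: rest) = none
    · rw [if_pos hc]
      rw [PySem.List.slice_from_one, List.tail_cons, ih ((x :: rest) :: stack)]
      simp only [altUnwind]
      conv_rhs => rw [missed_order_count, if_neg (Nat.not_le.mpr hc.1), hc.2]
      simp only [PySem.List.slice_from_one, List.tail_cons]
      exact congrArg _ (Int.add_comm _ _)
    · rw [if_neg hc]
      push Not at hc
      by_cases hlen : 1 < (x :: rest).length
      · obtain ⟨v, hv⟩ := Option.ne_none_iff_exists'.mp (hc hlen)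
        rw [if_pos hlen, hv]
        conv_rhs => rw [missed_order_count, if_neg (Nat.not_le.mpr hlen), hv]
        simp
      · rw [if_neg hlen]
        conv_rhs => rw [missed_order_count, if_pos (by simp at hlen ⊢; omega)]

-- ===== VERDICT (by name: the statement is the Claim_ definition above) =====
theorem missed_order_count_spec : Claim_equal_missed_order_count := by
  intro ordering S memo _ _
  unfold Spec_missed_order_count missed_order_count_alt
  by_cases h : ordering.length ≤ 1
  · rw [if_pos h, missed_order_count, if_pos h]
  · rw [if_neg h]
    have := peel_unwind S memo ordering []
    simp only [altUnwind] at this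
    exact this.symm
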